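-- pv_equiv track=rewrite | github.com/lipry/GenomeRegulatoryRegionNN | src/bayesian_mlp_exp.py | get_hidden_layers_combinations
-- ===== SOURCE A (Python) =====
-- def get_hidden_layers_combinations(hidden_layers, max_level = 3, allow_empty_first_level=True):
--     hiddenLayersList = []
--     # First round manually...
--     h1 = [[i] for i in hidden_layers[0]]
--     hiddenLayersList.append(h1)
--     # ...and from the second iteratively
--     for i in range(1, max_level):
--         tempList = []
--         for k in hiddenLayersList[-1]:
--             for j in hidden_layers[i]:
--                 if k[-1] > j:
--                     tempitem = list(k)
--                     tempitem.append(j)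
--                     tempList.append(tempitem)
--         hiddenLayersList.append(tempList)
--     # Add level [] if requested
--     if allow_empty_first_level:
--         hiddenLayersList.insert(0, [])
--     # Sort the list according to the total number of neurons in the entire net
--     tempLL = []
--     for ll in hiddenLayersList:
--         tempLL.append(sorted(ll, key=lambda x: sum(x)))
--
--     return tempLL
-- ===== SOURCE B (Python) =====
-- def get_hidden_layers_combinations(hidden_layers, max_level=3, allow_empty_first_level=True):
--     def below(bound, i, l):
--         # strictly decreasing tuples drawn from hidden_layers[i..l] whose entries stay below bound
--         if i > l:
--             return [[]]
--         return [[x] + rest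
--                 for x in hidden_layers[i] if x < bound
--                 for rest in below(x, i + 1, l)]
--
--     n_levels = max(1, max_level)
--     levels = [[[x] + rest for x in hidden_layers[0] for rest in below(x, 1, l)]
--               for l in range(n_levels)]
--     if allow_empty_first_level:
--         levels.insert(0, [])
--     return [sorted(level, key=sum) for level in levels]
-- ===== Notes on version B (the rewrite author's own statement) =====
-- stated objective: alternative
-- what changed: Each level is enumerated independently by a recursive depth-first backtracking over the layer lists (threading the current lower bound), instead of A's iterative dynamic-programming extension of the stored previous level.
import Mathlib
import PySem

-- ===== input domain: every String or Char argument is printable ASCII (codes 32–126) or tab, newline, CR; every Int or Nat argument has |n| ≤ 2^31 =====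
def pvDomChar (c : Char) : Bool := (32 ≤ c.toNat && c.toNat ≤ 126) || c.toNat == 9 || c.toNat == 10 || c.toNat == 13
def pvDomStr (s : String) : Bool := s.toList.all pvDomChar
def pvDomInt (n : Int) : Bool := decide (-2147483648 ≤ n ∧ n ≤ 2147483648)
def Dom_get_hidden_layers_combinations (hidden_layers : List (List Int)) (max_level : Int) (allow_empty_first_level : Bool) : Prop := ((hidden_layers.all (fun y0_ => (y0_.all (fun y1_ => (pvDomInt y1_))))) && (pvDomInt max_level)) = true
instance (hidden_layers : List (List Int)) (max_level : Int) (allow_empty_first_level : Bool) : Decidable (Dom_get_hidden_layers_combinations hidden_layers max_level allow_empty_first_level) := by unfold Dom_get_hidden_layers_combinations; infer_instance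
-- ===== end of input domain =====

-- B enumerates each level independently by recursive depth-first backtracking over the
-- layer lists instead of A's iterative extension of the stored previous level
-- (objective: alternative algorithm, no speed claim).

-- ===== PORT A =====
def get_hidden_layers_combinations (hidden_layers : List (List Int)) (max_level : Int) (allow_empty_first_level : Bool) : List (List (List Int)) :=
  let h1 : List (List Int) := (PySem.List.pyGetD hidden_layers 0 []).map (fun i => [i])
  let hiddenLayersList : List (List (List Int)) :=
    (PySem.List.pyRange 1 max_level 1).foldl
      (fun acc i =>
        acc ++ [(PySem.List.pyGetD acc (-1) []).foldl
          (fun tl k =>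
            (PySem.List.pyGetD hidden_layers i []).foldl
              (fun tl2 j =>
                if PySem.List.pyGetD k (-1) 0 > j then tl2 ++ [k ++ [j]] else tl2)
              tl)
          []])
      [h1]
  let hiddenLayersList' := if allow_empty_first_level then [] :: hiddenLayersList else hiddenLayersList
  hiddenLayersList'.foldl (fun acc ll => acc ++ [PySem.List.sorted ll (fun x => x.sum) false]) []

-- ===== PORT B =====
-- def below(bound, i, l): strictly decreasing tuples drawn from hidden_layers[i..l]
-- whose entries stay below bound (out-of-range hidden_layers[i] is an IndexError in
-- Python; the port reads [] there, which is only reached where the Python recursion dies out)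
def pvBelow (hidden_layers : List (List Int)) (bound : Int) (i : Int) (l : Int) : List (List Int) :=
  if l < i then [[]]
  else
    ((PySem.List.pyGetD hidden_layers i []).filter (fun x => x < bound)).flatMap
      (fun x => (pvBelow hidden_layers x (i + 1) l).map (fun rest => x :: rest))
termination_by (l + 1 - i).toNat
decreasing_by omega

def get_hidden_layers_combinations_alt (hidden_layers : List (List Int)) (max_level : Int) (allow_empty_first_level : Bool) : List (List (List Int)) :=
  let n_levels : Int := max 1 max_level
  let levels : List (List (List Int)) :=
    (PySem.List.pyRange 0 n_levels 1).map
      (fun l =>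
        (PySem.List.pyGetD hidden_layers 0 []).flatMap
          (fun x => (pvBelow hidden_layers x 1 l).map (fun rest => x :: rest)))
  let levels' := if allow_empty_first_level then [] :: levels else levels
  levels'.map (fun level => PySem.List.sorted level (fun x => x.sum) false)

-- ===== PRECONDITION & SPEC =====
-- Pre_ excludes exactly the inputs on which the Python A raises IndexError: an empty
-- hidden_layers, or max_level > len(hidden_layers) while a strictly decreasing selection
-- through ALL the layer lists exists (then the level loop reaches the out-of-range index).
-- (The Python B raises IndexError on the same inputs.)
def Pre_get_hidden_layers_combinations (hidden_layers : List (List Int)) (max_level : Int) (allow_empty_first_level : Bool) : Prop :=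
  hidden_layers ≠ [] ∧
    (max_level ≤ hidden_layers.length ∨
      ¬ ∃ f : (i : Fin hidden_layers.length) → Fin (hidden_layers.get i).length,
          ∀ (i : Fin hidden_layers.length) (h : i.1 + 1 < hidden_layers.length),
            (hidden_layers.get i).get (f i) >
              (hidden_layers.get ⟨i.1 + 1, h⟩).get (f ⟨i.1 + 1, h⟩))

instance (hidden_layers : List (List Int)) (max_level : Int) (allow_empty_first_level : Bool) : Decidable (Pre_get_hidden_layers_combinations hidden_layers max_level allow_empty_first_level) := by unfold Pre_get_hidden_layers_combinations; infer_instance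

def pvWitness_get_hidden_layers_combinations : List (List Int) × Int × Bool := ([[3, 2], [2, 1]], 2, true)

def Spec_get_hidden_layers_combinations (hidden_layers : List (List Int)) (max_level : Int) (allow_empty_first_level : Bool) (out : List (List (List Int))) : Prop := out = get_hidden_layers_combinations_alt hidden_layers max_level allow_empty_first_level
instance (hidden_layers : List (List Int)) (max_level : Int) (allow_empty_first_level : Bool) (out : List (List (List Int))) : Decidable (Spec_get_hidden_layers_combinations hidden_layers max_level allow_empty_first_level out) := by unfold Spec_get_hidden_layers_combinations; infer_instance

-- ===== CLAIM (what is proved, stated in full; the proofs are below) =====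
def Claim_equal_get_hidden_layers_combinations : Prop := ∀ (hidden_layers : List (List Int)) (max_level : Int) (allow_empty_first_level : Bool), Dom_get_hidden_layers_combinations hidden_layers max_level allow_empty_first_level → Pre_get_hidden_layers_combinations hidden_layers max_level allow_empty_first_level → Spec_get_hidden_layers_combinations hidden_layers max_level allow_empty_first_level (get_hidden_layers_combinations hidden_layers max_level allow_empty_first_level)

-- ===== LEMMAS AND PROOFS =====

-- cartesian product of the given lists, tuples in lexicographic (leftmost-major) order
def pvProduct (lists : List (List Int)) : List (List Int) :=
  lists.foldl (fun combos xs => combos.flatMap (fun c => xs.map (fun x => c ++ [x]))) [[]]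

-- strictly decreasing test
def pvDec (t : List Int) : Bool := (t.zip t.tail).all (fun p => p.1 > p.2)

-- A's inner double loop: extend each element of prev by each admissible j.
def pvExt (prev : List (List Int)) (xs : List Int) : List (List Int) :=
  prev.foldl
    (fun tl k =>
      xs.foldl
        (fun tl2 j => if PySem.List.pyGetD k (-1) 0 > j then tl2 ++ [k ++ [j]] else tl2)
        tl)
    []

-- level l as filtered product of the first l+1 layer lists
def pvLvl (hl : List (List Int)) (l : Nat) : List (List Int) :=
  (pvProduct (hl.take (l + 1))).filter pvDec

-- level l as both ports actually produce it (out-of-range levels are empty)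
def pvT (hl : List (List Int)) (l : Nat) : List (List Int) :=
  if l + 1 ≤ hl.length then pvLvl hl l else []

theorem pvProduct_append_singleton (ls : List (List Int)) (xs : List Int) :
    pvProduct (ls ++ [xs]) = (pvProduct ls).flatMap (fun c => xs.map (fun x => c ++ [x])) := by
  unfold pvProduct
  rw [List.foldl_append]
  simp

theorem pvProduct_cons (xs : List Int) (ls : List (List Int)) :
    pvProduct (xs :: ls) = xs.flatMap (fun x => (pvProduct ls).map (fun c => x :: c)) := by
  induction ls using List.reverseRecOn with
  | nil =>
    simp only [pvProduct, List.foldl_cons, List.foldl_nil]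
    induction xs with
    | nil => rfl
    | cons a as ihx => simp_all
  | append_singleton ls ys ih =>
    rw [show xs :: (ls ++ [ys]) = (xs :: ls) ++ [ys] from rfl,
      pvProduct_append_singleton, pvProduct_append_singleton, ih]
    simp [List.flatMap_assoc, List.map_flatMap, List.flatMap_map, Function.comp_def]

theorem pvProduct_length_mem (ls : List (List Int)) (c : List Int) (hc : c ∈ pvProduct ls) :
    c.length = ls.length := by
  induction ls using List.reverseRecOn generalizing c with
  | nil => simp [pvProduct] at hc; simp [hc]
  | append_singleton ls x ih =>
    rw [pvProduct_append_singleton] at hc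
    simp only [List.mem_flatMap, List.mem_map] at hc
    obtain ⟨c', hc', a, _, rfl⟩ := hc
    simp [ih c' hc']

theorem pvDec_cons_cons (a b : Int) (r : List Int) :
    pvDec (a :: b :: r) = (decide (a > b) && pvDec (b :: r)) := by
  simp [pvDec]

theorem pvDec_append_singleton (k : List Int) (hk : k ≠ []) (j : Int) :
    pvDec (k ++ [j]) = (pvDec k && decide (PySem.List.pyGetD k (-1) 0 > j)) := by
  rw [PySem.List.pyGetD_neg_one k 0 hk]
  induction k with
  | nil => exact absurd rfl hk
  | cons a t ih =>
    cases t with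
    | nil => simp [pvDec]
    | cons b t =>
      have h2 := ih (by simp)
      simp only [List.cons_append] at h2 ⊢
      rw [pvDec_cons_cons, pvDec_cons_cons, h2,
        List.getLast_cons (show (b :: t) ≠ [] by simp), Bool.and_assoc]

theorem pvExt_eq_flatMap (prev : List (List Int)) (xs : List Int) :
    pvExt prev xs =
      prev.flatMap (fun k => (xs.filter (fun j => PySem.List.pyGetD k (-1) 0 > j)).map (fun j => k ++ [j])) := by
  unfold pvExt
  have h : ∀ (tl : List (List Int)) (k : List Int),
      xs.foldl (fun tl2 j => if PySem.List.pyGetD k (-1) 0 > j then tl2 ++ [k ++ [j]] else tl2) tl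
        = tl ++ ((xs.filter (fun j => PySem.List.pyGetD k (-1) 0 > j)).map (fun j => k ++ [j])) := by
    intro tl k
    exact PySem.List.foldl_append_ite _ _ _ tl
  simp only [h]
  rw [PySem.List.foldl_append_eq_flatMap]
  simp

theorem pvExt_nil_right (prev : List (List Int)) : pvExt prev [] = [] := by
  rw [pvExt_eq_flatMap]
  simp

theorem pvLvl_zero (x : List Int) (t : List (List Int)) :
    pvLvl (x :: t) 0 = x.map (fun i => [i]) := by
  simp [pvLvl, pvProduct, List.filter_map, Function.comp_def, pvDec]

theorem pvLvl_succ (hl : List (List Int)) (n : Nat) (hn : n + 1 < hl.length) :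
    pvLvl hl (n + 1) = pvExt (pvLvl hl n) (PySem.List.pyGetD hl ((n : Int) + 1) []) := by
  have htake : hl.take (n + 1 + 1) = hl.take (n + 1) ++ [hl[n + 1]] := by
    rw [List.take_add_one, List.getElem?_eq_getElem hn]
    simp
  have hget : PySem.List.pyGetD hl ((n : Int) + 1) [] = hl[n + 1] := by
    have h : ((n : Int) + 1) = ((n + 1 : Nat) : Int) := by push_cast; ring
    rw [h, PySem.List.pyGetD_natCast, List.getD_eq_getElem?_getD, List.getElem?_eq_getElem hn]
    rfl
  rw [pvLvl, htake, pvProduct_append_singleton, pvExt_eq_flatMap, hget, List.filter_flatMap]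
  rw [show pvLvl hl n = (pvProduct (hl.take (n + 1))).filter pvDec from rfl]
  have hne : ∀ c ∈ pvProduct (hl.take (n + 1)), c ≠ [] := by
    intro c hc
    have hlc := pvProduct_length_mem _ c hc
    have hlen : (hl.take (n + 1)).length = n + 1 := by
      rw [List.length_take]; omega
    intro hcnil
    rw [hcnil, hlen] at hlc
    simp at hlc
  generalize pvProduct (hl.take (n + 1)) = L at hne ⊢
  induction L with
  | nil => simp
  | cons c L ih =>
    have hc : c ≠ [] := hne c (by simp)
    have ihL := ih (fun c h => hne c (by simp [h]))
    simp only [List.flatMap_cons, List.filter_cons]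
    rw [List.filter_map]
    have hf : List.filter (pvDec ∘ fun x => c ++ [x]) hl[n + 1] =
        List.filter (fun j => pvDec c && decide (PySem.List.pyGetD c (-1) 0 > j)) hl[n + 1] := by
      apply List.filter_congr
      intro j _
      simpa [Function.comp] using pvDec_append_singleton c hc j
    rw [hf]
    by_cases hd : pvDec c
    · simp only [hd, Bool.true_and, if_true, List.flatMap_cons, ihL]
    · simp only [hd, Bool.false_and, List.filter_false, List.map_nil,
        List.nil_append, ihL]
      simp

-- A port's level list is (range n).map (pvT hl)
theorem pvFoldl_levels (hl : List (List Int)) (n : Nat) (h1 : 1 ≤ n) :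
    (PySem.List.pyRange 1 (n : Int) 1).foldl
      (fun acc i =>
        acc ++ [(PySem.List.pyGetD acc (-1) []).foldl
          (fun tl k =>
            (PySem.List.pyGetD hl i []).foldl
              (fun tl2 j => if PySem.List.pyGetD k (-1) 0 > j then tl2 ++ [k ++ [j]] else tl2)
              tl)
          []])
      [(PySem.List.pyGetD hl 0 []).map (fun i => [i])] = (List.range n).map (pvT hl) := by
  induction n, h1 using Nat.le_induction with
  | base =>
    rw [PySem.List.pyRange_one_eq_nil (by norm_num)]
    simp only [List.foldl_nil, List.range_one, List.map_singleton]
    cases hl with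
    | nil => simp [pvT, PySem.List.pyGetD_zero]
    | cons x t =>
      rw [PySem.List.pyGetD_zero_cons, pvT, if_pos (by simp), pvLvl_zero]
  | succ n hn ih =>
    have hcast : ((n + 1 : Nat) : Int) = (n : Int) + 1 := by push_cast; ring
    rw [hcast, PySem.List.pyRange_one_succ_right (by exact_mod_cast hn), List.foldl_append,
      ih]
    simp only [List.foldl_cons, List.foldl_nil]
    obtain ⟨m, rfl⟩ : ∃ m, n = m + 1 := ⟨n - 1, by omega⟩
    have hlast : PySem.List.pyGetD (List.map (pvT hl) (List.range (m + 1))) (-1) []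
        = pvT hl m := by
      rw [List.range_succ, List.map_append, List.map_singleton,
        PySem.List.pyGetD_neg_one_append_singleton]
    rw [hlast]
    conv_rhs => rw [List.range_succ]
    rw [List.map_append, List.map_singleton]
    congr 1
    show [pvExt (pvT hl m) (PySem.List.pyGetD hl ((m : Int) + 1) [])] = [pvT hl (m + 1)]
    by_cases hm : m + 1 + 1 ≤ hl.length
    · rw [pvT, if_pos (by omega), pvT, if_pos (by omega), pvLvl_succ hl m (by omega)]
    · -- the new index m+1 is out of range: the port reads [], and the level is empty
      have hout : PySem.List.pyGetD hl ((m : Int) + 1) [] = [] := by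
        rw [show ((m : Int) + 1) = ((m + 1 : Nat) : Int) by push_cast; ring,
          PySem.List.pyGetD_natCast, List.getD_eq_getElem?_getD,
          List.getElem?_eq_none (by omega)]
        rfl
      rw [hout, pvExt_nil_right, pvT, if_neg (by omega)]

-- pvBelow returns [] as soon as the layer lists are exhausted before depth l
theorem pvBelow_nil (hl : List (List Int)) (b : Int) (i l : Nat)
    (h1 : i ≤ hl.length) (h2 : hl.length ≤ l) :
    pvBelow hl b (i : Int) (l : Int) = [] := by
  have H : ∀ (n : Nat) (b : Int) (i : Nat), i ≤ hl.length → hl.length - i = n →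
      pvBelow hl b (i : Int) (l : Int) = [] := by
    intro n
    induction n with
    | zero =>
      intro b i hi h0
      have hieq : i = hl.length := by omega
      rw [pvBelow, if_neg (by omega)]
      have : PySem.List.pyGetD hl (i : Int) [] = [] := by
        rw [PySem.List.pyGetD_natCast, List.getD_eq_getElem?_getD,
          List.getElem?_eq_none (by omega)]
        rfl
      rw [this]
      rfl
    | succ n ihn =>
      intro b i hi hsn
      rw [pvBelow, if_neg (by omega)]
      rw [List.flatMap_eq_nil_iff]
      intro x hx
      rw [show ((i : Int) + 1) = ((i + 1 : Nat) : Int) by push_cast; ring,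
        ihn x (i + 1) (by omega) (by omega)]
      rfl
  exact H (hl.length - i) b i h1 rfl

-- filtering 'b > head' commutes with restricting the head choices to those below b
theorem pvFilter_flatMap_head (ys : List Int) (b : Int) (Z : List (List Int)) :
    ys.flatMap (fun x => ((Z.filter (fun c => pvDec (b :: x :: c))).map (fun c => x :: c)))
      = (ys.filter (fun x => x < b)).flatMap
          (fun x => ((Z.filter (fun c => pvDec (x :: c))).map (fun c => x :: c))) := by
  induction ys with
  | nil => simp
  | cons y ys ih =>
    simp only [List.flatMap_cons, List.filter_cons]
    have hfn : (fun c => pvDec (b :: y :: c)) = fun c => (decide (b > y) && pvDec (y :: c)) :=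
      funext fun c => pvDec_cons_cons b y c
    rw [hfn, ih]
    by_cases hb : y < b
    · simp only [show decide (b > y) = true by simpa using hb, Bool.true_and, if_true,
        List.flatMap_cons]
    · simp only [show decide (b > y) = false by simpa using hb, Bool.false_and,
        List.filter_false, List.map_nil, List.nil_append]
      simp

-- pvBelow computes the bounded decreasing tuples: filter of the cartesian product
theorem pvBelow_eq (hl : List (List Int)) (l : Nat) (hl1 : l < hl.length) :
    ∀ (n : Nat) (b : Int) (i : Nat), i ≤ l + 1 → l + 1 - i = n →
      pvBelow hl b (i : Int) (l : Int)
        = (pvProduct ((hl.drop i).take (l + 1 - i))).filter (fun c => pvDec (b :: c)) := by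
  intro n
  induction n with
  | zero =>
    intro b i hi h0
    have hieq : i = l + 1 := by omega
    subst hieq
    rw [pvBelow, if_pos (by omega)]
    simp [pvProduct, pvDec]
  | succ n ihn =>
    intro b i hi hsn
    have hil : i ≤ l := by omega
    have hilen : i < hl.length := by omega
    rw [pvBelow, if_neg (by omega)]
    have hget : PySem.List.pyGetD hl (i : Int) [] = hl[i] := by
      rw [PySem.List.pyGetD_natCast, List.getD_eq_getElem?_getD,
        List.getElem?_eq_getElem hilen]
      rfl
    have hdrop : (hl.drop i).take (l + 1 - i) = hl[i] :: ((hl.drop (i + 1)).take (l - i)) := by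
      rw [List.drop_eq_getElem_cons hilen,
        show l + 1 - i = (l - i) + 1 by omega, List.take_succ_cons]
    rw [hget, hdrop, pvProduct_cons, List.filter_flatMap]
    have hinner : ∀ x : Int,
        List.filter (fun c => pvDec (b :: c)) (List.map (fun c => x :: c) (pvProduct ((hl.drop (i + 1)).take (l - i))))
          = ((pvProduct ((hl.drop (i + 1)).take (l - i))).filter (fun c => pvDec (b :: x :: c))).map (fun c => x :: c) := by
      intro x
      rw [List.filter_map]
      rfl
    simp only [hinner]
    rw [pvFilter_flatMap_head]
    apply List.flatMap_congr ?_
    intro x _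
    rw [show ((i : Int) + 1) = ((i + 1 : Nat) : Int) by push_cast; ring,
      ihn x (i + 1) (by omega) (by omega), show l + 1 - (i + 1) = l - i by omega]

-- B port's level k equals pvT hl k
theorem pvBlevel_eq (hl : List (List Int)) (k : Nat) :
    (PySem.List.pyGetD hl 0 []).flatMap
      (fun x => (pvBelow hl x 1 (k : Int)).map (fun rest => x :: rest)) = pvT hl k := by
  cases hl with
  | nil =>
    rw [show PySem.List.pyGetD ([] : List (List Int)) 0 [] = [] from rfl]
    simp [pvT]
  | cons x t =>
    rw [PySem.List.pyGetD_zero_cons]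
    by_cases hk : k + 1 ≤ (x :: t).length
    · rw [pvT, if_pos hk]
      have hb := fun b => pvBelow_eq (x :: t) k (by omega) k b 1 (by omega) (by omega)
      simp only [show ((1 : Nat) : Int) = (1 : Int) by norm_num] at hb
      rw [pvLvl, List.take_succ_cons, pvProduct_cons, List.filter_flatMap]
      apply List.flatMap_congr ?_
      intro x0 _
      rw [hb x0, List.filter_map]
      simp only [List.drop_succ_cons, List.drop_zero, show k + 1 - 1 = k by omega]
      rfl
    · rw [pvT, if_neg hk]
      rw [List.flatMap_eq_nil_iff]
      intro x0 hx0
      rw [show (1 : Int) = ((1 : Nat) : Int) by norm_num,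
        pvBelow_nil (x :: t) x0 1 k (by simp) (by simp at hk ⊢; omega)]
      rfl

-- ===== VERDICT (by name: the statement is the Claim_ definition above) =====
theorem get_hidden_layers_combinations_spec : Claim_equal_get_hidden_layers_combinations := by
  intro hl m ae _hdom _hpre
  unfold Spec_get_hidden_layers_combinations get_hidden_layers_combinations
    get_hidden_layers_combinations_alt
  simp only [PySem.List.foldl_append_singleton_eq_map, List.nil_append]
  have hB : (PySem.List.pyRange 0 (max 1 m) 1).map
      (fun l => (PySem.List.pyGetD hl 0 []).flatMap
        (fun x => (pvBelow hl x 1 l).map (fun rest => x :: rest)))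
      = (List.range (max 1 m).toNat).map (pvT hl) := by
    rw [PySem.List.pyRange_one, List.map_map]
    simp only [Int.sub_zero]
    apply List.map_congr_left
    intro k _
    simp only [Function.comp]
    rw [show ((0 : Int) + (k : Int)) = ((k : Nat) : Int) by ring, pvBlevel_eq]
  rw [hB]
  by_cases hm : 1 ≤ m
  · have hmax : max 1 m = m := by omega
    have hcast : ((m.toNat : Nat) : Int) = m := Int.toNat_of_nonneg (by omega)
    rw [hmax, show m = ((m.toNat : Nat) : Int) from hcast.symm,
      pvFoldl_levels hl m.toNat (by omega), Int.toNat_natCast]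
  · have hmax : max 1 m = 1 := by omega
    rw [hmax, show PySem.List.pyRange 1 m 1 = PySem.List.pyRange 1 ((1 : Nat) : Int) 1 by
        rw [PySem.List.pyRange_one_eq_nil (by omega), PySem.List.pyRange_one_eq_nil (by norm_num)],
      pvFoldl_levels hl 1 (by omega)]
    rfl
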